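-- pv_equiv track=rewrite | github.com/Xie-Rutai/Tai_t01 | test.py | fit_markdown
-- ===== SOURCE A (Python) =====
-- def fit_markdown(markdown):
--     """精简Markdown内容"""
--     # 移除连续的空行
--     lines = markdown.split('\n')
--     processed_lines = []
--     prev_empty = False
--
--     for line in lines:
--         if line.strip():
--             processed_lines.append(line)
--             prev_empty = False
--         elif not prev_empty:
--             processed_lines.append('')
--             prev_empty = True
--
--     # 移除开头和结尾的空行
--     while processed_lines and not processed_lines[0].strip():
--         processed_lines.pop(0)
--     while processed_lines and not processed_lines[-1].strip():
--         processed_lines.pop()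
--
--     return '\n'.join(processed_lines)
-- ===== SOURCE B (Python) =====
-- def fit_markdown(markdown):
--     """精简Markdown内容"""
--     # split into maximal runs of non-blank lines; blank runs become block boundaries
--     blocks = []
--     cur = []
--     for line in markdown.split('\n'):
--         if line.strip():
--             cur.append(line)
--         elif cur:
--             blocks.append(cur)
--             cur = []
--     if cur:
--         blocks.append(cur)
--     # one blank line between blocks; leading/trailing blanks vanish by construction
--     return '\n\n'.join('\n'.join(b) for b in blocks)
-- ===== Notes on version B (the rewrite author's own statement) =====
-- stated objective: simpler
-- what changed: Replaces the prev_empty flag state-machine plus the two leading/trailing pop-loops by grouping lines into maximal non-blank runs and joining the runs with a single blank line, so leading and trailing blanks never enter the result and no trimming passes are needed.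
import Mathlib
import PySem

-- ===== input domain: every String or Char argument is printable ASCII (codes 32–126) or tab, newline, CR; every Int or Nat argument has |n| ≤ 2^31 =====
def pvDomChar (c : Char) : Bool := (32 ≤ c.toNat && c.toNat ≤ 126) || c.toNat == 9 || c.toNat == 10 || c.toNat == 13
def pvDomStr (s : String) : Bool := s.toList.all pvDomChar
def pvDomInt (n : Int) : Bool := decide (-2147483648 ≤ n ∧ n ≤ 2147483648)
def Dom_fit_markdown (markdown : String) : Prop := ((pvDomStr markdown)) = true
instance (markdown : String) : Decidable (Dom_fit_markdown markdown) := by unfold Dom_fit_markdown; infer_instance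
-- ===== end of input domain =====

-- B collapses blank-line runs by grouping lines into maximal non-blank runs joined with "\n\n",
-- instead of A's prev_empty flag plus leading/trailing pop loops; same return value, no speed claim.

-- ===== PORT A =====
-- Python truthiness of line.strip(): pvBlank line = true ↔ line.strip() is empty (falsy)
def pvBlank (line : String) : Bool := PySem.Str.strip line == ""

-- loop body of A's "for line in lines" (state: processed_lines, prev_empty)
def pvStepA (st : List String × Bool) (line : String) : List String × Bool :=
  if pvBlank line = false then (st.1 ++ [line], false)
  else if st.2 = false then (st.1 ++ [""], true)
  else st

-- "while processed_lines and not processed_lines[0].strip(): pop(0)"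
def pvTrimFront : List String → List String
  | [] => []
  | l :: ls => if pvBlank l then pvTrimFront ls else l :: ls

-- "while processed_lines and not processed_lines[-1].strip(): pop()" (structural recursion from the right)
def pvTrimBack : List String → List String
  | [] => []
  | l :: ls =>
    match pvTrimBack ls with
    | [] => if pvBlank l then [] else [l]
    | r => l :: r

def fit_markdown (markdown : String) : String :=
  let lines := (PySem.Str.split? markdown "\n").getD []
  let st := List.foldl pvStepA ([], false) lines
  PySem.Str.join "\n" (pvTrimBack (pvTrimFront st.1))

-- ===== PORT B =====
-- loop body of B's "for line in ..." (state: blocks, cur)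
def pvStepB (st : List (List String) × List String) (line : String) : List (List String) × List String :=
  if pvBlank line = false then (st.1, st.2 ++ [line])
  else if st.2 = [] then st
  else (st.1 ++ [st.2], [])

-- B's trailing "if cur: blocks.append(cur)"
def pvFinalize (st : List (List String) × List String) : List (List String) :=
  if st.2 = [] then st.1 else st.1 ++ [st.2]

def fit_markdown_alt (markdown : String) : String :=
  let lines := (PySem.Str.split? markdown "\n").getD []
  let blocks := pvFinalize (List.foldl pvStepB ([], []) lines)
  PySem.Str.join "\n\n" (blocks.map (fun b => PySem.Str.join "\n" b))

-- ===== PRECONDITION & SPEC =====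
def Spec_fit_markdown (markdown : String) (out : String) : Prop := out = fit_markdown_alt markdown
instance (markdown : String) (out : String) : Decidable (Spec_fit_markdown markdown out) := by unfold Spec_fit_markdown; infer_instance

-- ===== CLAIM (what is proved, stated in full; the proofs are below) =====
def Claim_equal_fit_markdown : Prop := ∀ (markdown : String), Dom_fit_markdown markdown → Spec_fit_markdown markdown (fit_markdown markdown)

-- ===== LEMMAS AND PROOFS =====

-- suffix that A's fold appends from state prev_empty = prev
def pvG : Bool → List String → List String
  | _, [] => []
  | prev, l :: ls =>
    if pvBlank l = false then l :: pvG false ls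
    else if prev = false then "" :: pvG true ls
    else pvG true ls

-- blocks that B's loop still produces from current run cur
def pvK : List String → List String → List (List String)
  | cur, [] => if cur = [] then [] else [cur]
  | cur, l :: ls =>
    if pvBlank l = false then pvK (cur ++ [l]) ls
    else if cur = [] then pvK [] ls
    else cur :: pvK [] ls

-- flatten blocks with a single "" between consecutive blocks
def pvCat : List (List String) → List String
  | [] => []
  | [b] => b
  | b :: bs => b ++ "" :: pvCat bs

def pvCatC : List (List (List Char)) → List (List Char)
  | [] => []
  | [c] => c
  | c :: cs => c ++ [] :: pvCatC cs

lemma pvBlank_empty : pvBlank "" = true := by decide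

lemma pvFoldA (lines : List String) : ∀ proc prev,
    (List.foldl pvStepA (proc, prev) lines).1 = proc ++ pvG prev lines := by
  induction lines with
  | nil => intro proc prev; simp [pvG]
  | cons l ls ih =>
    intro proc prev
    by_cases hb : pvBlank l = false
    · simp [pvStepA, pvG, hb, ih]
    · by_cases hp : prev = false
      · simp [pvStepA, pvG, hb, hp, ih]
      · simp [pvStepA, pvG, hb, hp, ih]

lemma pvFoldB (lines : List String) : ∀ acc cur,
    pvFinalize (List.foldl pvStepB (acc, cur) lines) = acc ++ pvK cur lines := by
  induction lines with
  | nil =>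
    intro acc cur
    by_cases h : cur = [] <;> simp [pvFinalize, pvK, h]
  | cons l ls ih =>
    intro acc cur
    by_cases hb : pvBlank l = false
    · simp [pvStepB, pvK, hb, ih]
    · by_cases hc : cur = []
      · simp [pvStepB, pvK, hb, hc, ih]
      · simp [pvStepB, pvK, hb, hc, ih]

lemma pvTrimFront_pvG (lines : List String) : ∀ prev,
    pvTrimFront (pvG prev lines) = pvG false (lines.dropWhile pvBlank) := by
  induction lines with
  | nil => intro prev; simp [pvG, pvTrimFront]
  | cons l ls ih =>
    intro prev
    by_cases hb : pvBlank l = false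
    · simp [pvG, hb, pvTrimFront]
    · rw [Bool.not_eq_false] at hb
      by_cases hp : prev = false
      · simp [pvG, hb, hp, pvTrimFront, pvBlank_empty, ih]
      · simp [pvG, hb, hp, ih]

lemma pvK_dropWhile (lines : List String) :
    pvK [] lines = pvK [] (lines.dropWhile pvBlank) := by
  induction lines with
  | nil => simp
  | cons l ls ih =>
    by_cases hb : pvBlank l = false
    · simp [hb]
    · rw [Bool.not_eq_false] at hb
      simp [pvK, hb, ih]

lemma pvG_dropWhile (lines : List String) :
    pvG false (lines.dropWhile pvBlank) = pvG true (lines.dropWhile pvBlank) := by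
  rcases h : lines.dropWhile pvBlank with _ | ⟨l, t⟩
  · simp [pvG]
  · have hl : pvBlank l = false := by
      have := List.head_dropWhile_not pvBlank (l := lines)
      simp [h] at this
      simpa using this
    simp [pvG, hl]

lemma pvTrimBack_cons_of_not_blank (l : String) (ls : List String) (h : pvBlank l = false) :
    pvTrimBack (l :: ls) = l :: pvTrimBack ls := by
  rcases hr : pvTrimBack ls with _ | ⟨r, rs⟩ <;> simp [pvTrimBack, hr, h]

lemma pvK_mem_ne_nil (lines : List String) : ∀ cur b, b ∈ pvK cur lines → b ≠ [] := by
  induction lines with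
  | nil =>
    intro cur b hb
    by_cases h : cur = [] <;> simp [pvK, h] at hb
    subst hb; exact h
  | cons l ls ih =>
    intro cur b hb
    by_cases hb1 : pvBlank l = false
    · exact ih _ b (by simpa [pvK, hb1] using hb)
    · by_cases hc : cur = []
      · exact ih _ b (by simpa [pvK, hb1, hc] using hb)
      · simp [pvK, hb1, hc] at hb
        rcases hb with rfl | hb
        · exact hc
        · exact ih _ b hb

lemma pvCat_ne_nil (b : List String) (bs : List (List String)) (hb : b ≠ []) :
    pvCat (b :: bs) ≠ [] := by
  rcases bs with _ | ⟨c, cs⟩ <;> simp [pvCat, hb]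

lemma pvPhi (lines : List String) :
    (∀ cur, cur ≠ [] → pvCat (pvK cur lines) = cur ++ pvTrimBack (pvG false lines)) ∧
    (pvCat (pvK [] lines) = pvTrimBack (pvG true lines)) := by
  induction lines with
  | nil =>
    refine ⟨fun cur hc => ?_, ?_⟩
    · simp [pvK, pvG, pvCat, pvTrimBack, hc]
    · simp [pvK, pvG, pvCat, pvTrimBack]
  | cons l ls ih =>
    obtain ⟨ih1, ih2⟩ := ih
    by_cases hb : pvBlank l = false
    · refine ⟨fun cur hc => ?_, ?_⟩
      · rw [show pvK cur (l :: ls) = pvK (cur ++ [l]) ls from by simp [pvK, hb],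
          show pvG false (l :: ls) = l :: pvG false ls from by simp [pvG, hb],
          ih1 (cur ++ [l]) (by simp), pvTrimBack_cons_of_not_blank l _ hb]
        simp
      · rw [show pvK [] (l :: ls) = pvK [l] ls from by simp [pvK, hb],
          show pvG true (l :: ls) = l :: pvG false ls from by simp [pvG, hb],
          ih1 [l] (by simp), pvTrimBack_cons_of_not_blank l _ hb]
        simp
    · rw [Bool.not_eq_false] at hb
      refine ⟨fun cur hc => ?_, ?_⟩
      · rw [show pvK cur (l :: ls) = cur :: pvK [] ls from by simp [pvK, hb, hc]]
        rw [show pvG false (l :: ls) = "" :: pvG true ls from by simp [pvG, hb]]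
        rcases hk : pvK [] ls with _ | ⟨k0, ks⟩
        · have h0 : pvTrimBack (pvG true ls) = [] := by rw [← ih2, hk]; simp [pvCat]
          simp [pvCat, pvTrimBack, h0, pvBlank_empty]
        · have hk0 : k0 ≠ [] := pvK_mem_ne_nil ls [] k0 (by rw [hk]; simp)
          have hne : pvTrimBack (pvG true ls) ≠ [] := by
            rw [← ih2, hk]; exact pvCat_ne_nil k0 ks hk0
          have htb : pvTrimBack ("" :: pvG true ls) = "" :: pvTrimBack (pvG true ls) := by
            rcases hr : pvTrimBack (pvG true ls) with _ | ⟨r, rs⟩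
            · exact absurd hr hne
            · simp [pvTrimBack, hr]
          rw [htb, ← ih2, hk]
          rfl
      · rw [show pvK [] (l :: ls) = pvK [] ls from by simp [pvK, hb]]
        rw [show pvG true (l :: ls) = pvG true ls from by simp [pvG, hb]]
        exact ih2

lemma pvJoinAppend (sep : List Char) (xs : List (List Char)) : ∀ ys, xs ≠ [] → ys ≠ [] →
    PySem.Chars.join sep (xs ++ ys) =
      PySem.Chars.join sep xs ++ sep ++ PySem.Chars.join sep ys := by
  induction xs with
  | nil => intro ys h; exact absurd rfl h
  | cons x xs ih =>
    intro ys _ hy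
    rcases xs with _ | ⟨x', xs'⟩
    · rcases ys with _ | ⟨y, ys'⟩
      · exact absurd rfl hy
      · simp [PySem.Chars.join_cons_cons, PySem.Chars.join_singleton]
    · rw [show (x :: x' :: xs') ++ ys = x :: (x' :: (xs' ++ ys)) from by simp,
        PySem.Chars.join_cons_cons, PySem.Chars.join_cons_cons,
        show x' :: (xs' ++ ys) = (x' :: xs') ++ ys from by simp,
        ih ys (by simp) hy]
      simp

lemma pvCatC_ne_nil (c : List (List Char)) (cs : List (List (List Char))) (hc : c ≠ []) :
    pvCatC (c :: cs) ≠ [] := by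
  rcases cs with _ | ⟨d, ds⟩ <;> simp [pvCatC, hc]

lemma pvJC (sep : List Char) : ∀ (cs : List (List (List Char))), (∀ c ∈ cs, c ≠ []) →
    PySem.Chars.join sep (pvCatC cs) =
      PySem.Chars.join (sep ++ sep) (cs.map (PySem.Chars.join sep)) := by
  intro cs
  induction cs with
  | nil => intro _; simp [pvCatC]
  | cons c cs ih =>
    intro h
    rcases cs with _ | ⟨c', cs'⟩
    · simp [pvCatC, PySem.Chars.join_singleton]
    · have hc : c ≠ [] := h c (by simp)
      have hX : pvCatC (c' :: cs') ≠ [] :=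
        pvCatC_ne_nil c' cs' (h c' (by simp))
      rw [show pvCatC (c :: c' :: cs') = c ++ [] :: pvCatC (c' :: cs') from rfl,
        pvJoinAppend sep c ([] :: pvCatC (c' :: cs')) hc (by simp)]
      rcases hXc : pvCatC (c' :: cs') with _ | ⟨x, X'⟩
      · exact absurd hXc hX
      · have ihh := ih (fun d hd => h d (by simp [hd]))
        rw [hXc, List.map_cons] at ihh
        rw [PySem.Chars.join_cons_cons, List.map_cons, List.map_cons,
          PySem.Chars.join_cons_cons, ← ihh]
        simp

lemma pvCat_toList (bs : List (List String)) :
    (pvCat bs).map String.toList = pvCatC (bs.map (List.map String.toList)) := by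
  induction bs with
  | nil => simp [pvCat, pvCatC]
  | cons b bs ih =>
    rcases bs with _ | ⟨b', bs'⟩
    · simp [pvCat, pvCatC]
    · rw [show pvCat (b :: b' :: bs') = b ++ "" :: pvCat (b' :: bs') from rfl]
      simp only [List.map_append, List.map_cons, ih]
      rfl

lemma pvJ (bs : List (List String)) (h : ∀ b ∈ bs, b ≠ []) :
    PySem.Str.join "\n" (pvCat bs) =
      PySem.Str.join "\n\n" (bs.map (fun b => PySem.Str.join "\n" b)) := by
  simp only [PySem.Str.join]
  apply congrArg String.ofList
  rw [pvCat_toList, show ("\n\n".toList) = "\n".toList ++ "\n".toList from by decide]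
  have hmap : (bs.map (fun b => String.ofList
        (PySem.Chars.join "\n".toList (b.map String.toList)))).map String.toList =
      (bs.map (List.map String.toList)).map (PySem.Chars.join "\n".toList) := by
    simp [List.map_map, Function.comp_def]
  rw [hmap]
  exact pvJC "\n".toList (bs.map (List.map String.toList))
    (fun c hc => by
      simp only [List.mem_map] at hc
      obtain ⟨b, hb, rfl⟩ := hc
      simpa using h b hb)

-- ===== VERDICT (by name: the statement is the Claim_ definition above) =====
theorem fit_markdown_spec : Claim_equal_fit_markdown := by
  intro markdown _
  simp only [Spec_fit_markdown, fit_markdown, fit_markdown_alt]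
  rw [pvFoldA, pvFoldB]
  simp only [List.nil_append]
  rw [pvTrimFront_pvG, pvG_dropWhile, ← (pvPhi (((PySem.Str.split? markdown "\n").getD []).dropWhile pvBlank)).2,
    ← pvK_dropWhile]
  exact pvJ _ (fun b hb => pvK_mem_ne_nil _ [] b hb)
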